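-- pv_equiv track=rewrite | github.com/Maco21496/remindandpay-live | api/app/routers/invoices.py | suggest_mapping
-- ===== SOURCE A (Python) =====
-- from typing import Optional, List, Dict, Any, Set
--
-- def suggest_mapping(headers: List[str]) -> Dict[str, str]:
--     if not headers:
--         return {}
--     low = [h.strip().lower() for h in headers]
--     def find(*names):
--         for n in names:
--             if n in low:
--                 return headers[low.index(n)]
--         return None
--     return {
--         "customer_name":  find("customer","customer name","client","client name","company"),
--         "invoice_number": find("invoice","invoice no","invoice number","inv no","inv #","ref","reference"),
--         "amount_due":     find("amount","amount due","total","value"),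
--         "issue_date":     find("date","invoice date","issue date","raised","raised date"),
--         "due_date":       find("due","due date"),
--         "currency":       find("currency","curr"),
--         "terms_type":     find("terms","payment terms"),
--         "terms_days":     find("terms days","days"),
--         "email":          find("email","e-mail"),
--         "phone":          find("phone","mobile","telephone"),
--     }
-- ===== SOURCE B (Python) =====
-- def suggest_mapping(headers):
--     if not headers:
--         return {}
--     low = [h.strip().lower() for h in headers]
--     fields = [
--         ("customer_name",  ["customer", "customer name", "client", "client name", "company"]),
--         ("invoice_number", ["invoice", "invoice no", "invoice number", "inv no", "inv #", "ref", "reference"]),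
--         ("amount_due",     ["amount", "amount due", "total", "value"]),
--         ("issue_date",     ["date", "invoice date", "issue date", "raised", "raised date"]),
--         ("due_date",       ["due", "due date"]),
--         ("currency",       ["currency", "curr"]),
--         ("terms_type",     ["terms", "payment terms"]),
--         ("terms_days",     ["terms days", "days"]),
--         ("email",          ["email", "e-mail"]),
--         ("phone",          ["phone", "mobile", "telephone"]),
--     ]
--
--     def best(names):
--         # single scan of the headers, keeping the candidate of smallest rank
--         # (strict '<' keeps the earliest header on equal rank)
--         rank = {n: i for i, n in enumerate(names)}
--         chosen, chosen_rank = None, len(names)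
--         for h, k in zip(headers, low):
--             r = rank.get(k)
--             if r is not None and r < chosen_rank:
--                 chosen, chosen_rank = h, r
--         return chosen
--
--     return {field: best(names) for field, names in fields}
-- ===== Notes on version B (the rewrite author's own statement) =====
-- stated objective: alternative
-- what changed: Replaces per-candidate membership tests plus list.index scans with, per field, a precomputed name->rank dict and a single argmin scan over the headers keeping the smallest-rank (earliest on ties) match.
import Mathlib
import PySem

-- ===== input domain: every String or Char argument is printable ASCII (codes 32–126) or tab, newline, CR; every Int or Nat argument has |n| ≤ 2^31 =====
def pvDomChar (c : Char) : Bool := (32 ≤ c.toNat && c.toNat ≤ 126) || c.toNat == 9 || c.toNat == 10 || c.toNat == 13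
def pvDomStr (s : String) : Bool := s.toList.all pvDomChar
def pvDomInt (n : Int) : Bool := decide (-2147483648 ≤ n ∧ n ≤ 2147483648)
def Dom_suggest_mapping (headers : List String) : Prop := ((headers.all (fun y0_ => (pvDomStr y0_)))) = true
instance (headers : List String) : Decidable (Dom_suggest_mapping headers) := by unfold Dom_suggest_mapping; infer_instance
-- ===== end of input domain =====

-- B replaces A's per-candidate membership + list.index scans by a per-field rank dict and one argmin scan over the headers (alternative decomposition, same values).


-- ===== PORT A =====
-- h.strip().lower()
def pvNorm (h : String) : String := PySem.Str.lower (PySem.Str.strip h)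

-- A's inner `find`: for n in names: if n in low: return headers[low.index(n)]; return None
def pvFindA (headers low : List String) : List String → Option String
  | [] => none
  | n :: ns =>
      if low.contains n then
        PySem.List.pyGet? headers (((PySem.List.index? low n).getD 0 : Nat) : Int)
      else
        pvFindA headers low ns

def suggest_mapping (headers : List String) : List (String × Option String) :=
  if headers = [] then []
  else
    let low := headers.map pvNorm
    [("customer_name",  pvFindA headers low ["customer", "customer name", "client", "client name", "company"]),
     ("invoice_number", pvFindA headers low ["invoice", "invoice no", "invoice number", "inv no", "inv #", "ref", "reference"]),
     ("amount_due",     pvFindA headers low ["amount", "amount due", "total", "value"]),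
     ("issue_date",     pvFindA headers low ["date", "invoice date", "issue date", "raised", "raised date"]),
     ("due_date",       pvFindA headers low ["due", "due date"]),
     ("currency",       pvFindA headers low ["currency", "curr"]),
     ("terms_type",     pvFindA headers low ["terms", "payment terms"]),
     ("terms_days",     pvFindA headers low ["terms days", "days"]),
     ("email",          pvFindA headers low ["email", "e-mail"]),
     ("phone",          pvFindA headers low ["phone", "mobile", "telephone"])]

-- ===== PORT B =====
def pvFields : List (String × List String) :=
  [("customer_name",  ["customer", "customer name", "client", "client name", "company"]),
   ("invoice_number", ["invoice", "invoice no", "invoice number", "inv no", "inv #", "ref", "reference"]),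
   ("amount_due",     ["amount", "amount due", "total", "value"]),
   ("issue_date",     ["date", "invoice date", "issue date", "raised", "raised date"]),
   ("due_date",       ["due", "due date"]),
   ("currency",       ["currency", "curr"]),
   ("terms_type",     ["terms", "payment terms"]),
   ("terms_days",     ["terms days", "days"]),
   ("email",          ["email", "e-mail"]),
   ("phone",          ["phone", "mobile", "telephone"])]

-- rank = {n: i for i, n in enumerate(names)}
def pvRank (names : List String) : PySem.Dict String Int :=
  (PySem.List.enumerate names).foldl (fun d p => d.insert p.2 p.1) PySem.Dict.empty

-- loop body of B's scan: r = rank.get(k); if r is not None and r < chosen_rank: update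
def pvStep (rank : PySem.Dict String Int) (st : Option String × Int) (p : String × String) :
    Option String × Int :=
  match rank.get? p.2 with
  | some r => if r < st.2 then (some p.1, r) else st
  | none => st

-- B's `best`
def pvBest (headers low names : List String) : Option String :=
  ((headers.zip low).foldl (pvStep (pvRank names)) (none, (names.length : Int))).1

def suggest_mapping_alt (headers : List String) : List (String × Option String) :=
  if headers = [] then []
  else
    let low := headers.map pvNorm
    pvFields.map (fun p => (p.1, pvBest headers low p.2))

-- ===== PRECONDITION & SPEC =====
def Spec_suggest_mapping (headers : List String) (out : List (String × Option String)) : Prop := out = suggest_mapping_alt headers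
instance (headers : List String) (out : List (String × Option String)) : Decidable (Spec_suggest_mapping headers out) := by unfold Spec_suggest_mapping; infer_instance

-- ===== CLAIM (what is proved, stated in full; the proofs are below) =====
def Claim_equal_suggest_mapping : Prop := ∀ (headers : List String), Dom_suggest_mapping headers → Spec_suggest_mapping headers (suggest_mapping headers)

-- ===== LEMMAS AND PROOFS =====

-- rank lookup = index in the (Nodup) name list
theorem pvRank_aux (names : List String) : names.Nodup → ∀ (s : Int) (d : PySem.Dict String Int) (k : String),
    ((PySem.List.enumerate names s).foldl (fun d p => d.insert p.2 p.1) d).get? k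
      = match PySem.List.index? names k with
        | some i => some (s + i)
        | none => d.get? k := by
  induction names with
  | nil => intro _ s d k; simp [PySem.List.enumerate, PySem.List.index?]
  | cons n ns ih =>
      intro hnd s d k
      rw [PySem.List.enumerate_cons]
      simp only [List.foldl_cons]
      rcases List.nodup_cons.mp hnd with ⟨hn, hnd'⟩
      by_cases hk : k = n
      · subst hk
        have hno : PySem.List.index? ns k = none := (PySem.List.index?_eq_none_iff ns k).mpr hn
        rw [ih hnd' _ _ _, PySem.List.index?_cons_self, hno]
        simp [PySem.Dict.get?_insert_self]
      · rw [ih hnd' _ _ _, PySem.List.index?_cons_of_ne ns (fun h : n = k => hk h.symm)]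
        cases PySem.List.index? ns k with
        | none => exact PySem.Dict.get?_insert_of_ne d s hk
        | some i => simp; ring

theorem pvRank_get (names : List String) (hnd : names.Nodup) (k : String) :
    (pvRank names).get? k = (PySem.List.index? names k).map (fun i => (i : Int)) := by
  unfold pvRank
  rw [pvRank_aux names hnd 0 PySem.Dict.empty k]
  cases h : PySem.List.index? names k with
  | none => simp [PySem.Dict.get?_empty]
  | some i => simp

-- a fold none of whose elements can beat the current rank leaves the state unchanged
theorem pvFold_stuck (rank : PySem.Dict String Int) (l : List (String × String))
    (st : Option String × Int)
    (h : ∀ p ∈ l, ∀ r, rank.get? p.2 = some r → ¬ r < st.2) :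
    l.foldl (pvStep rank) st = st := by
  induction l with
  | nil => rfl
  | cons p l ih =>
      have hstep : pvStep rank st p = st := by
        unfold pvStep
        cases hr : rank.get? p.2 with
        | none => rfl
        | some r => simp [h p (by simp) r hr]
      simp only [List.foldl_cons, hstep]
      exact ih (fun q hq r hr => h q (by simp [hq]) r hr)

-- shifting every consulted rank (and the state rank) by one commutes with the fold
theorem pvFold_shift (rank rank' : PySem.Dict String Int) (l : List (String × String))
    (h : ∀ p ∈ l, rank'.get? p.2 = (rank.get? p.2).map (· + 1)) (st : Option String × Int) :
    l.foldl (pvStep rank') (st.1, st.2 + 1)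
      = ((l.foldl (pvStep rank) st).1, (l.foldl (pvStep rank) st).2 + 1) := by
  induction l generalizing st with
  | nil => rfl
  | cons p l ih =>
      simp only [List.foldl_cons]
      have h' : ∀ q ∈ l, rank'.get? q.2 = (rank.get? q.2).map (· + 1) :=
        fun q hq => h q (by simp [hq])
      have hp := h p (by simp)
      cases hr : rank.get? p.2 with
      | none =>
          rw [hr] at hp
          have : pvStep rank' (st.1, st.2 + 1) p = (st.1, st.2 + 1) := by
            unfold pvStep; simp [hp]
          have h2 : pvStep rank st p = st := by unfold pvStep; simp [hr]
          rw [this, h2, ih h' st]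
      | some r =>
          rw [hr] at hp
          have h2 : pvStep rank st p = if r < st.2 then (some p.1, r) else st := by
            unfold pvStep; simp [hr]
          have h1 : pvStep rank' (st.1, st.2 + 1) p
              = if r < st.2 then (some p.1, r + 1) else (st.1, st.2 + 1) := by
            unfold pvStep
            rw [hp]
            by_cases hlt : r < st.2
            · rw [if_pos hlt]
              simp only [Option.map_some]
              rw [if_pos (show r + 1 < st.2 + 1 by omega)]
            · rw [if_neg hlt]
              simp only [Option.map_some]
              rw [if_neg (show ¬ r + 1 < st.2 + 1 by omega)]
          rw [h1, h2]
          by_cases hlt : r < st.2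
          · simp only [if_pos hlt]; exact ih h' (some p.1, r)
          · simp only [if_neg hlt]; exact ih h' st

-- once the rank-0 name is met first, the fold returns that header
theorem pvFold_hit (rank : PySem.Dict String Int) (n : String)
    (hr0 : rank.get? n = some 0)
    (hpos : ∀ k r, rank.get? k = some r → 0 ≤ r ∧ (r = 0 → k = n)) :
    ∀ (ls hs : List String) (j : Nat), ls.length = hs.length →
      PySem.List.index? ls n = some j →
      ∀ (st : Option String × Int), 1 ≤ st.2 →
        ((hs.zip ls).foldl (pvStep rank) st).1 = PySem.List.pyGet? hs (j : Int) := by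
  intro ls
  induction ls with
  | nil => intro hs j _ hj; simp [PySem.List.index?] at hj
  | cons l ls ih =>
      intro hs j hlen hj st hst
      cases hs with
      | nil => simp at hlen
      | cons h hs =>
          simp only [List.zip_cons_cons, List.foldl_cons]
          by_cases hl : l = n
          · subst hl
            rw [PySem.List.index?_cons_self] at hj
            injection hj with hj; subst hj
            have hstep : pvStep rank st (h, l) = (some h, 0) := by
              unfold pvStep; simp only [hr0]
              simp [show (0:Int) < st.2 by omega]
            rw [hstep]
            rw [pvFold_stuck rank _ _ (by
              intro p _ r hr
              have := (hpos p.2 r hr).1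
              simp; omega)]
            simp [PySem.List.pyGet?, PySem.List.pyIdx?]
          · rw [PySem.List.index?_cons_of_ne ls hl] at hj
            cases hj' : PySem.List.index? ls n with
            | none => rw [hj'] at hj; simp at hj
            | some j' =>
                rw [hj'] at hj
                simp only [Option.map_some] at hj
                injection hj with hj; subst hj
                have hnext : ∀ st' : Option String × Int,
                    st' = pvStep rank st (h, l) → 1 ≤ st'.2 := by
                  intro st' he
                  unfold pvStep at he
                  cases hr : rank.get? l with
                  | none => simp only [hr] at he; subst he; exact hst
                  | some r =>
                      simp only [hr] at he
                      rcases hpos l r hr with ⟨hr0', hrn⟩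
                      have hne0 : r ≠ 0 := fun e => hl (hrn e)
                      by_cases hlt : r < st.2
                      · rw [if_pos hlt] at he; subst he; simp; omega
                      · rw [if_neg hlt] at he; subst he; exact hst
                have := ih hs j' (by simpa using hlen) hj' (pvStep rank st (h, l))
                  (hnext _ rfl)
                rw [this]
                rw [show ((j' + 1 : Nat) : Int) = (j' : Int) + 1 by push_cast; ring]
                rw [PySem.List.pyGet?_cons_succ]

-- the per-field equivalence: B's argmin scan = A's priority search
theorem pvBest_eq_find (headers low : List String) (hlen : low.length = headers.length)
    (names : List String) (hnd : names.Nodup) :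
    pvBest headers low names = pvFindA headers low names := by
  induction names with
  | nil =>
      unfold pvBest pvFindA
      rw [pvFold_stuck _ _ _ (by
        intro p hp r hr
        rw [pvRank_get [] hnd p.2] at hr
        simp at hr)]
  | cons n ns ih =>
      rcases List.nodup_cons.mp hnd with ⟨hn, hnd'⟩
      by_cases hmem : n ∈ low
      · -- A returns headers[low.index(n)]; B's scan stops improving after the first n
        cases hj : PySem.List.index? low n with
        | none => exact absurd ((PySem.List.index?_eq_none_iff low n).mp hj) (by simp [hmem])
        | some j =>
            have hr0 : (pvRank (n :: ns)).get? n = some 0 := by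
              rw [pvRank_get _ hnd, PySem.List.index?_cons_self]; rfl
            have hpos : ∀ k r, (pvRank (n :: ns)).get? k = some r → 0 ≤ r ∧ (r = 0 → k = n) := by
              intro k r hr
              rw [pvRank_get _ hnd] at hr
              cases hi : PySem.List.index? (n :: ns) k with
              | none => rw [hi] at hr; simp at hr
              | some i =>
                  rw [hi] at hr
                  simp at hr
                  constructor
                  · omega
                  · intro h0
                    have hi0 : i = 0 := by omega
                    subst hi0
                    by_cases hk : k = n
                    · exact hk
                    · rw [PySem.List.index?_cons_of_ne ns (fun e : n = k => hk e.symm)] at hi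
                      cases h' : PySem.List.index? ns k <;> rw [h'] at hi <;> simp at hi
            have hfold := pvFold_hit (pvRank (n :: ns)) n hr0 hpos low headers j hlen hj
              ((none : Option String), (((n :: ns).length : Nat) : Int))
              (by simp)
            unfold pvBest pvFindA
            rw [hfold, hj]
            have hcont : low.contains n = true := by
              simpa using hmem
            rw [if_pos hcont]
            rfl
      · -- n matches no header: drop it on both sides (all ranks shift by one)
        unfold pvFindA
        rw [if_neg (by simpa using hmem)]
        rw [← ih hnd']
        unfold pvBest
        have hsh : ∀ p ∈ headers.zip low,
            (pvRank (n :: ns)).get? p.2 = ((pvRank ns).get? p.2).map (· + 1) := by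
          intro p hp
          have hp2 : p.2 ∈ low := (List.of_mem_zip hp).2
          have hne : p.2 ≠ n := fun e => hmem (e ▸ hp2)
          rw [pvRank_get _ hnd, pvRank_get _ hnd']
          rw [PySem.List.index?_cons_of_ne ns (fun e : n = p.2 => hne e.symm)]
          cases PySem.List.index? ns p.2 <;> simp
        have hshift := pvFold_shift (pvRank ns) (pvRank (n :: ns)) (headers.zip low) hsh
          ((none : Option String), ((ns.length : Nat) : Int))
        dsimp only at hshift
        rw [show (((n :: ns).length : Nat) : Int) = ((ns.length : Nat) : Int) + 1 by
          simp]
        rw [hshift]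

-- ===== VERDICT (by name: the statement is the Claim_ definition above) =====
theorem suggest_mapping_spec : Claim_equal_suggest_mapping := by
  intro headers _
  unfold Spec_suggest_mapping suggest_mapping suggest_mapping_alt
  by_cases h : headers = []
  · simp [h]
  · rw [if_neg h, if_neg h]
    simp only [pvFields, List.map_cons, List.map_nil]
    have hlen : (headers.map pvNorm).length = headers.length := by simp
    have hb := fun names hnd =>
      pvBest_eq_find headers (headers.map pvNorm) hlen names hnd
    rw [hb _ (by decide), hb _ (by decide), hb _ (by decide), hb _ (by decide),
        hb _ (by decide), hb _ (by decide), hb _ (by decide), hb _ (by decide),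
        hb _ (by decide), hb _ (by decide)]
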